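-- pv_equiv track=rewrite | github.com/bacross/Project-Euler | problem_19.py | days_for_year
-- ===== SOURCE A (Python) =====
-- def days_for_year(n):
--     if n==365:
--         jan=[i for i in range(1,32)]
--         feb=[i for i in range(1,29)]
--         mar=[i for i in range(1,32)]
--         apr=[i for i in range(1,31)]
--         may=[i for i in range(1,32)]
--         jun=[i for i in range(1,31)]
--         jul=[i for i in range(1,32)]
--         aug=[i for i in range(1,32)]
--         sep=[i for i in range(1,31)]
--         octo=[i for i in range(1,32)]
--         nov=[i for i in range(1,31)]
--         dec=[i for i in range(1,32)]
--     else: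
--         jan=[i for i in range(1,32)]
--         feb=[i for i in range(1,30)]
--         mar=[i for i in range(1,32)]
--         apr=[i for i in range(1,31)]
--         may=[i for i in range(1,32)]
--         jun=[i for i in range(1,31)]
--         jul=[i for i in range(1,32)]
--         aug=[i for i in range(1,32)]
--         sep=[i for i in range(1,31)]
--         octo=[i for i in range(1,32)]
--         nov=[i for i in range(1,31)]
--         dec=[i for i in range(1,32)]
--
--     tmp_year=[jan,feb,mar,apr,may,jun,jul,aug,sep,octo,nov,dec]
--
--     year_days=[]
--     for each in tmp_year:
--         for day in each:
--             year_days.append(day)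
--
--     return year_days
-- ===== SOURCE B (Python) =====
-- def days_for_year(n):
--     lengths = [31, 28 if n == 365 else 29, 31, 30, 31, 30, 31, 31, 30, 31, 30, 31]
--     out = []
--     m, d = 0, 1
--     while m < 12:
--         out.append(d)
--         if d == lengths[m]:
--             m, d = m + 1, 1
--         else:
--             d += 1
--     return out
-- ===== Notes on version B (the rewrite author's own statement) =====
-- stated objective: alternative
-- what changed: Replaces the twelve precomputed per-month day lists and nested month/day loops with a month-length table driven by a single flat state-machine loop that keeps a (month, day) counter and resets the day counter at each month boundary.
import Mathlib
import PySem

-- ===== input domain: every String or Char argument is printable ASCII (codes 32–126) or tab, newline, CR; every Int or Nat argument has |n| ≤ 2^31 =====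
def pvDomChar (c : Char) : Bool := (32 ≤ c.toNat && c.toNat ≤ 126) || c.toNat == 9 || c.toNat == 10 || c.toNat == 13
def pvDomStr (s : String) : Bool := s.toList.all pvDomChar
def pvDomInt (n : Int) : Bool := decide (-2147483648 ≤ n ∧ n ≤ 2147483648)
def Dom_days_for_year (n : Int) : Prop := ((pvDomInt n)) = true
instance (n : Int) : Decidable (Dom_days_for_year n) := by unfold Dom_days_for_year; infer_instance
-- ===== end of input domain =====

-- B replaces the twelve precomputed day lists and nested loops with a month-length table
-- driven by a single flat state-machine loop over a (month, day) counter (alternative).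
-- ===== PORT A =====
def days_for_year (n : Int) : List Int :=
  let jan := PySem.List.pyRange 1 32 1
  let feb := if n = 365 then PySem.List.pyRange 1 29 1 else PySem.List.pyRange 1 30 1
  let mar := PySem.List.pyRange 1 32 1
  let apr := PySem.List.pyRange 1 31 1
  let may := PySem.List.pyRange 1 32 1
  let jun := PySem.List.pyRange 1 31 1
  let jul := PySem.List.pyRange 1 32 1
  let aug := PySem.List.pyRange 1 32 1
  let sep := PySem.List.pyRange 1 31 1
  let octo := PySem.List.pyRange 1 32 1
  let nov := PySem.List.pyRange 1 31 1
  let dec := PySem.List.pyRange 1 32 1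
  let tmp_year := [jan, feb, mar, apr, may, jun, jul, aug, sep, octo, nov, dec]
  tmp_year.foldl (fun year_days each => each.foldl (fun acc day => acc ++ [day]) year_days) []

-- ===== PORT B =====
-- while loop ported with fuel (400 > 366 iterations, the loop's fixed bound); exact step for step.
def dfyLoop (fuel : Nat) (lengths : List Int) (m : Nat) (d : Int) (out : List Int) : List Int :=
  match fuel with
  | 0 => out
  | fuel + 1 =>
    if m < 12 then
      let out' := out ++ [d]
      if d = lengths.getD m 0 then dfyLoop fuel lengths (m + 1) 1 out'
      else dfyLoop fuel lengths m (d + 1) out'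
    else out

def days_for_year_alt (n : Int) : List Int :=
  let lengths : List Int := [31, if n = 365 then 28 else 29, 31, 30, 31, 30, 31, 31, 30, 31, 30, 31]
  dfyLoop 400 lengths 0 1 []

-- ===== PRECONDITION & SPEC =====
def Spec_days_for_year (n : Int) (out : List Int) : Prop := out = days_for_year_alt n
instance (n : Int) (out : List Int) : Decidable (Spec_days_for_year n out) := by unfold Spec_days_for_year; infer_instance

-- ===== CLAIM =====
def Claim_equal_days_for_year : Prop := ∀ (n : Int), Dom_days_for_year n → Spec_days_for_year n (days_for_year n)

-- ===== LEMMAS AND PROOFS =====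

-- ===== VERDICT =====
set_option maxRecDepth 40000 in
theorem days_for_year_spec : Claim_equal_days_for_year := by
  intro n _
  unfold Spec_days_for_year days_for_year days_for_year_alt
  by_cases h : n = 365 <;> simp only [h, if_pos, if_neg, not_false_iff] <;> decide
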